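-- pv_equiv track=rewrite | github.com/aesdhj/competition_previously | ccf_bdci_2020_didi/data/utils.py | add_link_info
-- ===== SOURCE A (Python) =====
-- def add_link_info(link_add_info, sub_info, num, max_number, link_set):
-- 	for info in sub_info:
-- 		if info[1] in link_set and info[0] in link_set:
-- 			link_add_info.append(info)
-- 		elif info[1] not in link_set and info[0] not in link_set:
-- 			if num > max_number - 2:
-- 				continue
-- 			link_set.add(info[1])
-- 			link_set.add(info[0])
-- 			link_add_info.append(info)
-- 			num += 2
-- 		elif info[1] not in link_set:
-- 			if num > max_number - 1:
-- 				continue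
-- 			link_set.add(info[1])
-- 			link_add_info.append(info)
-- 			num += 1
-- 		elif info[0] not in link_set:
-- 			if num > max_number - 1:
-- 				continue
-- 			link_set.add(info[0])
-- 			link_add_info.append(info)
-- 			num += 1
-- 	return link_add_info, num, link_set
-- ===== SOURCE B (Python) =====
-- def add_link_info(link_add_info, sub_info, num, max_number, link_set):
-- 	# Phase 1: greedy while budget remains; once num >= max_number no node can
-- 	# ever be added again, so we stop early.
-- 	i = 0
-- 	while i < len(sub_info) and num < max_number:
-- 		info = sub_info[i]
-- 		i += 1
-- 		new = [x for x in (info[1], info[0]) if x not in link_set]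
-- 		if len(new) == 2 and num + 2 > max_number:
-- 			continue
-- 		for x in new:
-- 			link_set.add(x)
-- 		num += len(new)
-- 		link_add_info.append(info)
-- 	# Phase 2: set is frozen; keep only edges with both endpoints present.
-- 	link_add_info.extend(info for info in sub_info[i:]
-- 	                     if info[1] in link_set and info[0] in link_set)
-- 	return link_add_info, num, link_set
-- ===== Notes on version B (the rewrite author's own statement) =====
-- stated objective: alternative
-- what changed: Two-phase algorithm: a greedy loop that terminates early as soon as the node budget saturates (num >= max_number, after which no node can ever be added), followed by a plain filter of the remaining edges for both-endpoints-already-present; A instead runs its 4-way branch with per-branch cap checks over every edge.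
import Mathlib
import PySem

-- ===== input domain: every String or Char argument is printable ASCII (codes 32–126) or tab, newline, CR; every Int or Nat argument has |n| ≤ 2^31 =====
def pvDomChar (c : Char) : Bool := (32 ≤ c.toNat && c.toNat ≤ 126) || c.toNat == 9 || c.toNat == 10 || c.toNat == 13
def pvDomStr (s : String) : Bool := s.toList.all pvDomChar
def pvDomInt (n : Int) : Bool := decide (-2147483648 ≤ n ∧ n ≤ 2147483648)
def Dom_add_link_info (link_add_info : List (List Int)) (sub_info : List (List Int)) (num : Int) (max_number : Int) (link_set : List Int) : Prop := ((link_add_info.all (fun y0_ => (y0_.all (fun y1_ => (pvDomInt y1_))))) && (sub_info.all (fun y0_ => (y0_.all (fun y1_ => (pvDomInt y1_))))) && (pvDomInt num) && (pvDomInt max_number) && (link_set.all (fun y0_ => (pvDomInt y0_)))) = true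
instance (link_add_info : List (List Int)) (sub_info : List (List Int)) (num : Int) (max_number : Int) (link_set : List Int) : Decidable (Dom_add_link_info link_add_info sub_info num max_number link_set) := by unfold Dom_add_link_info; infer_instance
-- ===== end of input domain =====

-- B is a two-phase algorithm: a greedy loop that stops early once the node budget saturates
-- (num >= max_number), then a plain both-endpoints-present filter of the remaining edges;
-- both Pythons mutate link_add_info and link_set in the same way, and the equivalence proved
-- here is about the returned triple.

-- ===== PORT A =====
-- one iteration of A's loop body (literal: the if/elif chain, per-branch cap checks and adds)
def add_link_info_stepA (max_number : Int) (st : List (List Int) × Int × List Int) (info : List Int) : List (List Int) × Int × List Int :=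
  match st with
  | (la, n, ls) =>
    match PySem.List.pyGet? info 1, PySem.List.pyGet? info 0 with
    | some a, some b =>
      if a ∈ ls ∧ b ∈ ls then
        (la ++ [info], n, ls)
      else if a ∉ ls ∧ b ∉ ls then
        if n > max_number - 2 then (la, n, ls)
        else (la ++ [info], n + 2, PySem.Set.add (PySem.Set.add ls a) b)
      else if a ∉ ls then
        if n > max_number - 1 then (la, n, ls)
        else (la ++ [info], n + 1, PySem.Set.add ls a)
      else if b ∉ ls then
        if n > max_number - 1 then (la, n, ls)
        else (la ++ [info], n + 1, PySem.Set.add ls b)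
      else (la, n, ls)
    | _, _ => (la, n, ls)  -- IndexError in Python (info too short): excluded by Pre_

def add_link_info (link_add_info : List (List Int)) (sub_info : List (List Int)) (num : Int) (max_number : Int) (link_set : List Int) : List (List Int) × Int × List Int :=
  sub_info.foldl (add_link_info_stepA max_number) (link_add_info, num, link_set)

-- ===== PORT B =====
-- B phase 1: the while loop — greedy while num < max_number, returning the final state and
-- the unprocessed suffix (Python's sub_info[i:]) when the budget saturates or the list ends
def add_link_info_phase1 (max_number : Int) : List (List Int) → List (List Int) × Int × List Int → (List (List Int) × Int × List Int) × List (List Int)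
  | [], st => (st, [])
  | info :: rest, (la, n, ls) =>
    if n < max_number then
      match PySem.List.pyGet? info 1, PySem.List.pyGet? info 0 with
      | some a, some b =>
        let new := ([a, b]).filter (fun x => decide (x ∉ ls))
        if new.length = 2 ∧ n + 2 > max_number then
          add_link_info_phase1 max_number rest (la, n, ls)
        else
          add_link_info_phase1 max_number rest (la ++ [info], n + new.length, new.foldl PySem.Set.add ls)
      | _, _ => add_link_info_phase1 max_number rest (la, n, ls)  -- IndexError in Python: excluded by Pre_
    else ((la, n, ls), info :: rest)

-- B phase 2 predicate: both endpoints already present (info too short ⇒ IndexError, excluded by Pre_)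
def add_link_info_bothIn (ls : List Int) (info : List Int) : Bool :=
  match PySem.List.pyGet? info 1, PySem.List.pyGet? info 0 with
  | some a, some b => decide (a ∈ ls ∧ b ∈ ls)
  | _, _ => false

def add_link_info_alt (link_add_info : List (List Int)) (sub_info : List (List Int)) (num : Int) (max_number : Int) (link_set : List Int) : List (List Int) × Int × List Int :=
  match add_link_info_phase1 max_number sub_info (link_add_info, num, link_set) with
  | ((la, n, ls), rest) => (la ++ rest.filter (add_link_info_bothIn ls), n, ls)

-- ===== PRECONDITION & SPEC =====
-- Pre_ excludes edges shorter than 2 entries, on which Python's info[1] raises IndexError.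
def Pre_add_link_info (link_add_info : List (List Int)) (sub_info : List (List Int)) (num : Int) (max_number : Int) (link_set : List Int) : Prop :=
  ∀ info ∈ sub_info, 2 ≤ info.length
instance (link_add_info : List (List Int)) (sub_info : List (List Int)) (num : Int) (max_number : Int) (link_set : List Int) : Decidable (Pre_add_link_info link_add_info sub_info num max_number link_set) := by unfold Pre_add_link_info; infer_instance
def pvWitness_add_link_info : List (List Int) × List (List Int) × Int × Int × List Int :=
  ([[1, 2]], [[2, 3], [4, 5], [3, 3]], 2, 4, [1, 2])
def Spec_add_link_info (link_add_info : List (List Int)) (sub_info : List (List Int)) (num : Int) (max_number : Int) (link_set : List Int) (out : List (List Int) × Int × List Int) : Prop := out = add_link_info_alt link_add_info sub_info num max_number link_set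
instance (link_add_info : List (List Int)) (sub_info : List (List Int)) (num : Int) (max_number : Int) (link_set : List Int) (out : List (List Int) × Int × List Int) : Decidable (Spec_add_link_info link_add_info sub_info num max_number link_set out) := by unfold Spec_add_link_info; infer_instance

-- ===== CLAIM (what is proved, stated in full; the proofs are below) =====
def Claim_equal_add_link_info : Prop := ∀ (link_add_info : List (List Int)) (sub_info : List (List Int)) (num : Int) (max_number : Int) (link_set : List Int), Dom_add_link_info link_add_info sub_info num max_number link_set → Pre_add_link_info link_add_info sub_info num max_number link_set → Spec_add_link_info link_add_info sub_info num max_number link_set (add_link_info link_add_info sub_info num max_number link_set)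

-- ===== LEMMAS AND PROOFS =====

-- once saturated (¬ n < max), A's step only appends both-present edges and changes nothing else
lemma stepA_sat (max_number n : Int) (la : List (List Int)) (ls : List Int) (info : List Int)
    (hn : ¬ n < max_number) (h : 2 ≤ info.length) :
    add_link_info_stepA max_number (la, n, ls) info
      = (la ++ (if add_link_info_bothIn ls info then [info] else []), n, ls) := by
  match info, h with
  | a' :: b' :: rest, _ =>
    have h1 : PySem.List.pyGet? (a' :: b' :: rest) 1 = some b' := by
      simp [PySem.List.pyGet?, PySem.List.pyIdx?]
    have h0 : PySem.List.pyGet? (a' :: b' :: rest) 0 = some a' := by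
      simp [PySem.List.pyGet?, PySem.List.pyIdx?,
            show (0:Int) ≤ (rest.length:Int) + 1 by positivity]
    by_cases ha : b' ∈ ls <;> by_cases hb : a' ∈ ls <;>
      simp_all [add_link_info_stepA, add_link_info_bothIn, h1, h0] <;>
      first
        | omega
        | (split_ifs <;> simp_all <;> omega)

-- folding A's step from a saturated state = appending the both-present filter
lemma foldA_sat (max_number n : Int) (la : List (List Int)) (ls : List Int)
    (hn : ¬ n < max_number) :
    ∀ l : List (List Int), (∀ info ∈ l, 2 ≤ info.length) →
      l.foldl (add_link_info_stepA max_number) (la, n, ls)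
        = (la ++ l.filter (add_link_info_bothIn ls), n, ls) := by
  intro l
  induction l generalizing la with
  | nil => simp
  | cons x xs ih =>
    intro hpre
    have hx := hpre x (by simp)
    rw [List.foldl_cons, stepA_sat max_number n la ls x hn hx]
    rw [ih _ (fun i hi => hpre i (by simp [hi]))]
    by_cases hb : add_link_info_bothIn ls x <;> simp [hb]

-- while the budget is open, A's step agrees with B's phase-1 body
lemma stepA_open (max_number n : Int) (la : List (List Int)) (ls : List Int) (a b : Int) (info : List Int)
    (h1 : PySem.List.pyGet? info 1 = some a) (h0 : PySem.List.pyGet? info 0 = some b)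
    (hn : n < max_number) :
    add_link_info_stepA max_number (la, n, ls) info
      = (if ((([a, b]).filter (fun x => decide (x ∉ ls))).length = 2 ∧ n + 2 > max_number)
         then (la, n, ls)
         else (la ++ [info],
               n + (([a, b]).filter (fun x => decide (x ∉ ls))).length,
               (([a, b]).filter (fun x => decide (x ∉ ls))).foldl PySem.Set.add ls)) := by
  by_cases ha : a ∈ ls <;> by_cases hb : b ∈ ls <;>
    simp_all [add_link_info_stepA, List.foldl, PySem.Set.add_of_mem] <;>
    split_ifs <;> simp_all <;> omega

-- main invariant: A's fold = B's phase 1 followed by the filter of the leftover suffix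
lemma fold_eq_phases (max_number : Int) :
    ∀ (l : List (List Int)) (la : List (List Int)) (n : Int) (ls : List Int),
      (∀ info ∈ l, 2 ≤ info.length) →
      l.foldl (add_link_info_stepA max_number) (la, n, ls)
        = (match add_link_info_phase1 max_number l (la, n, ls) with
           | ((la', n', ls'), rest) => (la' ++ rest.filter (add_link_info_bothIn ls'), n', ls')) := by
  intro l
  induction l with
  | nil => intro la n ls _; simp [add_link_info_phase1]
  | cons x xs ih =>
    intro la n ls hpre
    have hx := hpre x (by simp)
    have hxs : ∀ info ∈ xs, 2 ≤ info.length := fun i hi => hpre i (by simp [hi])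
    by_cases hn : n < max_number
    · match x, hx with
      | a' :: b' :: r, _ =>
        have h1 : PySem.List.pyGet? (a' :: b' :: r) 1 = some b' := by
          simp [PySem.List.pyGet?, PySem.List.pyIdx?]
        have h0 : PySem.List.pyGet? (a' :: b' :: r) 0 = some a' := by
          simp [PySem.List.pyGet?, PySem.List.pyIdx?,
                show (0:Int) ≤ (r.length:Int) + 1 by positivity]
        rw [List.foldl_cons, stepA_open max_number n la ls b' a' _ h1 h0 hn]
        simp only [add_link_info_phase1, hn, if_pos, h1, h0]
        split_ifs with hc
        · rw [ih la n ls hxs]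
        · rw [ih _ _ _ hxs]
    · rw [foldA_sat max_number n la ls hn (x :: xs) hpre]
      simp [add_link_info_phase1, hn]

-- ===== VERDICT (by name: the statement is the Claim_ definition above) =====
theorem add_link_info_spec : Claim_equal_add_link_info := by
  intro la si n mx ls _ hpre
  unfold Spec_add_link_info add_link_info add_link_info_alt
  exact fold_eq_phases mx si la n ls hpre
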